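-- pv_equiv track=rewrite | github.com/Fondamenti18/fondamenti-di-programmazione | students/1810997/homework01/program02.py | conv2
-- ===== SOURCE A (Python) =====
-- dizLow={1:"uno", 2:"due", 3:"tre", 4:"quattro", 5:"cinque",6:"sei", 7:"sette", 8:"otto", 9:"nove", 10:"dieci",11:"undici", 12:"dodici", 13:"tredici",14:"quattordici", 15:"quindici", 16:"sedici",17:"diciassette", 18:"diciotto", 19:"diciannove"}
--
-- dizDec={2:"venti", 3:"trenta", 4:"quaranta",5:"cinquanta", 6:"sessanta",7:"settanta", 8:"ottanta", 9:"novanta"}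
--
-- def conv2(n):
--     if n == 0:
--         return ""
--
--     elif n <= 19:
--         return dizLow[n]
--
--     elif n <= 99:
--         letter = dizDec[n//10]
--         t = n%10
--         if t == 1 or t == 8:
--             letter = letter[:-1]
--         return letter + conv2(n%10)
--
--    # elif n <= 199:
--     #    app=(n%100)//10
--      #   centinaia='cento'
--       #  if app==8:
--        #     centinaia=centinaia[:-1]
--         #return centinaia + conv2(n%100)
--
--     elif n <= 999:
--         dec = n%100
--         dec = dec//10
--         letter = "cent"
--         if dec != 8:
--             letter = letter + "o"
--         cent=''
--         if(n//100!=1):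
--             cent=dizLow[n//100]
--         return cent +letter + conv2(n%100)
--
--     elif n<= 1999 :
--         return "mille" + conv2(n%1000)
--
--     elif n<= 999999:
--         return conv2(n//1000) +"mila" + conv2(n%1000)
--
--     elif n <= 1999999:
--         return "unmilione" + conv2(n%1000000)
--
--     elif n <= 999999999:
--         return conv2(n//1000000)+"milioni" +conv2(n%1000000)
--     elif n <= 1999999999:
--         return "unmiliardo" + conv2(n%1000000000)
--
--     else:
--         return conv2(n//1000000000) +"miliardi" + conv2(n%1000000000)
-- ===== SOURCE B (Python) =====
-- # Iterative scale-table implementation: spell each three-digit group once with a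
-- # single 0..999 helper and pair it with its scale word, instead of A's deep
-- # recursion with per-range branches.
--
-- _UNITS = ["", "uno", "due", "tre", "quattro", "cinque", "sei", "sette", "otto",
--           "nove", "dieci", "undici", "dodici", "tredici", "quattordici",
--           "quindici", "sedici", "diciassette", "diciotto", "diciannove"]
-- _TENS = ["", "", "venti", "trenta", "quaranta", "cinquanta", "sessanta",
--          "settanta", "ottanta", "novanta"]
--
--
-- def _spell3(k):
--     """Italian spelling of 0 <= k <= 999 ('' for 0)."""
--     s = ""
--     h, r = divmod(k, 100)
--     if h:
--         if h > 1:
--             s += _UNITS[h]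
--         s += "cent" if r // 10 == 8 else "cento"
--     if r:
--         if r <= 19:
--             s += _UNITS[r]
--         else:
--             t = _TENS[r // 10]
--             u = r % 10
--             if u == 1 or u == 8:
--                 t = t[:-1]
--             s += t + _UNITS[u]
--     return s
--
--
-- def conv2(n):
--     parts = []
--     for div, one, many in ((10 ** 9, "unmiliardo", "miliardi"),
--                            (10 ** 6, "unmilione", "milioni"),
--                            (1000, "mille", "mila")):
--         g, n = divmod(n, div)
--         if g == 1:
--             parts.append(one)
--         elif g:
--             parts.append(_spell3(g) + many)
--     parts.append(_spell3(n))
--     return "".join(parts)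
-- ===== Notes on version B (the rewrite author's own statement) =====
-- stated objective: alternative
-- what changed: Replaces A's deep range-branch recursion with an iterative loop over a (scale, singular, plural) table that splits n into three-digit groups and spells each group once with one 0..999 helper; Pre_ excludes negative inputs, on which A raises KeyError.
import Mathlib
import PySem

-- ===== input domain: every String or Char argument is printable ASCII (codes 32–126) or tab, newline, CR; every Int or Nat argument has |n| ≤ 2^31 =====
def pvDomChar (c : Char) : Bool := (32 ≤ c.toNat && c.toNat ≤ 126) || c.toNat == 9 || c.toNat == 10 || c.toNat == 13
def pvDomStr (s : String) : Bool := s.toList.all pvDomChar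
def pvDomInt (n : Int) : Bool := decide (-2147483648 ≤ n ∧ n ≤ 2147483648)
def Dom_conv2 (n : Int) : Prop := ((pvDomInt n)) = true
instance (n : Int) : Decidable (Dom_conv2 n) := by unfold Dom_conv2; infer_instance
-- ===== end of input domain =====

-- B replaces A's deep range-branch recursion by an iterative loop over a
-- (scale, singular, plural) table with one 0..999 spelling helper; same value on
-- every non-negative n (A raises KeyError on negative n, excluded by Pre_conv2).

-- ===== PORT A =====
-- A's dict literals; dizLowF/dizDecF = Python's dizLow[k]/dizDec[k]. Under Pre_conv2
-- every lookup A performs hits a present key, so the "" default is never used (on a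
-- missing key Python raises KeyError; those inputs are outside Pre_conv2).
def dizLow : PySem.Dict Nat String := PySem.Dict.ofList
  [(1, "uno"), (2, "due"), (3, "tre"), (4, "quattro"), (5, "cinque"), (6, "sei"),
   (7, "sette"), (8, "otto"), (9, "nove"), (10, "dieci"), (11, "undici"),
   (12, "dodici"), (13, "tredici"), (14, "quattordici"), (15, "quindici"),
   (16, "sedici"), (17, "diciassette"), (18, "diciotto"), (19, "diciannove")]

def dizDec : PySem.Dict Nat String := PySem.Dict.ofList
  [(2, "venti"), (3, "trenta"), (4, "quaranta"), (5, "cinquanta"), (6, "sessanta"),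
   (7, "settanta"), (8, "ottanta"), (9, "novanta")]

def dizLowF (k : Nat) : String := PySem.Dict.getD dizLow k ""
def dizDecF (k : Nat) : String := PySem.Dict.getD dizDec k ""

-- A's recursion, transliterated branch for branch on Nat (for n ≥ 0, Python's //
-- and % coincide with Nat / and %; keys are Nat since every key A looks up under
-- Pre_conv2 is ≥ 1).  The first argument is fuel making the recursion structural:
-- every recursive call's argument is strictly smaller than n, so any fuel > n
-- computes A's value (convAF_fuel_irrel below) and the fuel-0 branch is never
-- taken.  letter[:-1] is PySem.Str.slice letter none (some (-1)).
def convAF : Nat → Nat → String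
  | 0, _ => ""
  | fuel + 1, n =>
    if n = 0 then ""
    else if n ≤ 19 then dizLowF n
    else if n ≤ 99 then
      let letter := dizDecF (n / 10)
      let t := n % 10
      let letter := if t = 1 ∨ t = 8 then PySem.Str.slice letter none (some (-1)) else letter
      letter ++ convAF fuel (n % 10)
    else if n ≤ 999 then
      let dec := (n % 100) / 10
      let letter := if dec ≠ 8 then "cent" ++ "o" else "cent"
      let cent := if n / 100 ≠ 1 then dizLowF (n / 100) else ""
      cent ++ letter ++ convAF fuel (n % 100)
    else if n ≤ 1999 then "mille" ++ convAF fuel (n % 1000)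
    else if n ≤ 999999 then convAF fuel (n / 1000) ++ "mila" ++ convAF fuel (n % 1000)
    else if n ≤ 1999999 then "unmilione" ++ convAF fuel (n % 1000000)
    else if n ≤ 999999999 then convAF fuel (n / 1000000) ++ "milioni" ++ convAF fuel (n % 1000000)
    else if n ≤ 1999999999 then "unmiliardo" ++ convAF fuel (n % 1000000000)
    else convAF fuel (n / 1000000000) ++ "miliardi" ++ convAF fuel (n % 1000000000)

def conv2 (n : Int) : String := convAF (n.toNat + 1) n.toNat

-- ===== PORT B =====
def unitsTable : List String :=
  ["", "uno", "due", "tre", "quattro", "cinque", "sei", "sette", "otto", "nove",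
   "dieci", "undici", "dodici", "tredici", "quattordici", "quindici", "sedici",
   "diciassette", "diciotto", "diciannove"]

def tensTable : List String :=
  ["", "", "venti", "trenta", "quaranta", "cinquanta", "sessanta", "settanta",
   "ottanta", "novanta"]

-- Source B's _spell3 (called with 0 ≤ k ≤ 999 only; the list indices are then in
-- range, so getD "" = Python's `[i]`).  t[:-1] is PySem.Str.slice t none (some (-1)).
def spell3 (k : Nat) : String :=
  let h := k / 100
  let r := k % 100
  let s := ""
  let s := if h ≠ 0 then
      (s ++ (if h > 1 then unitsTable.getD h "" else "")) ++
        (if r / 10 = 8 then "cent" else "cento")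
    else s
  if r ≠ 0 then
    if r ≤ 19 then s ++ unitsTable.getD r ""
    else
      let t := tensTable.getD (r / 10) ""
      let u := r % 10
      let t := if u = 1 ∨ u = 8 then PySem.Str.slice t none (some (-1)) else t
      s ++ (t ++ unitsTable.getD u "")
  else s

def scaleTable : List (Nat × String × String) :=
  [(1000000000, "unmiliardo", "miliardi"), (1000000, "unmilione", "milioni"),
   (1000, "mille", "mila")]

-- Source B's loop: a fold over the scale table carrying (joined parts so far, remainder);
-- "".join(parts) is the concatenation accumulated on the left.
def conv2_alt (n : Int) : String :=
  let st := scaleTable.foldl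
    (fun (st : String × Nat) t =>
      let g := st.2 / t.1
      let r := st.2 % t.1
      (st.1 ++ (if g = 1 then t.2.1 else if g ≠ 0 then spell3 g ++ t.2.2 else ""), r))
    ("", n.toNat)
  st.1 ++ spell3 st.2

-- ===== PRECONDITION & SPEC =====
-- Pre_ excludes exactly the negative inputs, on which A raises KeyError (dizLow[n] with n absent).
def Pre_conv2 (n : Int) : Prop := 0 ≤ n
instance (n : Int) : Decidable (Pre_conv2 n) := by unfold Pre_conv2; infer_instance

def pvWitness_conv2 : Int := (21)

def Spec_conv2 (n : Int) (out : String) : Prop := out = conv2_alt n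
instance (n : Int) (out : String) : Decidable (Spec_conv2 n out) := by unfold Spec_conv2; infer_instance

-- ===== CLAIM (what is proved, stated in full; the proofs are below) =====
def Claim_equal_conv2 : Prop := ∀ (n : Int), Dom_conv2 n → Pre_conv2 n → Spec_conv2 n (conv2 n)

-- ===== LEMMAS AND PROOFS =====

-- one scale step of B's fold, as a standalone function (proof helper)
def part (g : Nat) (one many : String) : String :=
  if g = 1 then one else if g ≠ 0 then spell3 g ++ many else ""

-- Fuel irrelevance: any fuel > n computes A's value.
set_option maxHeartbeats 1000000 in
theorem convAF_fuel_irrel (n : Nat) : ∀ f g : Nat, n < f → n < g → convAF f n = convAF g n := by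
  induction n using Nat.strong_induction_on with
  | _ n ih =>
    intro f g hf hg
    match f, g with
    | f + 1, g + 1 =>
      simp only [convAF]
      split_ifs <;>
        first
        | rfl
        | (congr 1 <;> first | rfl | (apply ih <;> omega) | (congr 1 <;> first | rfl | (apply ih <;> omega)))

theorem convA_unfold (f n : Nat) (h : n < f) : convAF f n = convAF (n + 1) n :=
  convAF_fuel_irrel n f (n + 1) h (Nat.lt_succ_self n)

-- A = B's three-digit helper on a full group, checked exhaustively.
set_option maxHeartbeats 1000000 in
set_option maxRecDepth 10000 in
theorem small_eq : ∀ m ∈ List.range 1000, convAF 1000 m = spell3 m := by decide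

theorem convA_eq_spell3 {m : Nat} (h : m ≤ 999) : convAF (m + 1) m = spell3 m := by
  rw [← convA_unfold 1000 m (by omega)]
  exact small_eq m (List.mem_range.mpr (by omega))

-- B's fold, unfolded to its three scale steps.
theorem conv2_alt_closed (n : Int) : conv2_alt n =
    ((("" ++ part (n.toNat / 1000000000) "unmiliardo" "miliardi") ++
        part (n.toNat % 1000000000 / 1000000) "unmilione" "milioni") ++
      part (n.toNat % 1000000000 % 1000000 / 1000) "mille" "mila") ++
    spell3 (n.toNat % 1000000000 % 1000000 % 1000) := by
  simp only [conv2_alt, scaleTable, List.foldl, part]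

-- thousands + units tail (A on m < 10^6 = B's last two parts)
theorem tail_thousands (m : Nat) (hm : m ≤ 999999) :
    convAF (m + 1) m = part (m / 1000) "mille" "mila" ++ spell3 (m % 1000) := by
  by_cases h1 : m ≤ 999
  · have hq : m / 1000 = 0 := by omega
    have hr : m % 1000 = m := by omega
    rw [hq, hr, convA_eq_spell3 h1]
    simp [part]
  · rw [convA_unfold (m + 1) m (by omega)]
    simp only [convAF]
    rw [if_neg (by omega : ¬ m = 0), if_neg (by omega : ¬ m ≤ 19),
      if_neg (by omega : ¬ m ≤ 99), if_neg (by omega : ¬ m ≤ 999)]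
    by_cases h2 : m ≤ 1999
    · rw [if_pos h2, convA_unfold m (m % 1000) (by omega),
        convA_eq_spell3 (show m % 1000 ≤ 999 by omega)]
      have hq : m / 1000 = 1 := by omega
      simp [part, hq]
    · rw [if_neg h2, if_pos hm,
        convA_unfold m (m % 1000) (by omega), convA_unfold m (m / 1000) (by omega),
        convA_eq_spell3 (show m % 1000 ≤ 999 by omega),
        convA_eq_spell3 (show m / 1000 ≤ 999 by omega)]
      have hq1 : m / 1000 ≠ 1 := by omega
      have hq0 : m / 1000 ≠ 0 := by omega
      simp [part, hq1, hq0, String.append_assoc]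

-- millions + thousands + units tail (A on m < 10^9 = B's last three parts)
theorem tail_millions (m : Nat) (hm : m ≤ 999999999) :
    convAF (m + 1) m =
      part (m / 1000000) "unmilione" "milioni" ++
        (part (m % 1000000 / 1000) "mille" "mila" ++ spell3 (m % 1000000 % 1000)) := by
  by_cases h1 : m ≤ 999999
  · have hq : m / 1000000 = 0 := by omega
    have hr : m % 1000000 = m := by omega
    rw [hq, hr, tail_thousands m h1]
    simp [part]
  · rw [convA_unfold (m + 1) m (by omega)]
    simp only [convAF]
    rw [if_neg (by omega : ¬ m = 0), if_neg (by omega : ¬ m ≤ 19),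
      if_neg (by omega : ¬ m ≤ 99), if_neg (by omega : ¬ m ≤ 999),
      if_neg (by omega : ¬ m ≤ 1999), if_neg (by omega : ¬ m ≤ 999999)]
    by_cases h2 : m ≤ 1999999
    · rw [if_pos h2, convA_unfold m (m % 1000000) (by omega),
        tail_thousands (m % 1000000) (by omega)]
      have hq : m / 1000000 = 1 := by omega
      simp [part, hq]
    · rw [if_neg h2, if_pos hm,
        convA_unfold m (m % 1000000) (by omega), convA_unfold m (m / 1000000) (by omega),
        tail_thousands (m % 1000000) (by omega),
        convA_eq_spell3 (show m / 1000000 ≤ 999 by omega)]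
      have hq1 : m / 1000000 ≠ 1 := by omega
      have hq0 : m / 1000000 ≠ 0 := by omega
      simp [part, hq1, hq0, String.append_assoc]

-- ===== VERDICT (by name: the statement is the Claim_ definition above) =====
theorem conv2_spec : Claim_equal_conv2 := by
  intro n hdom hpre
  unfold Spec_conv2 conv2
  rw [conv2_alt_closed]
  have hbound : n.toNat ≤ 2147483648 := by
    unfold Dom_conv2 pvDomInt at hdom
    simp only [decide_eq_true_eq] at hdom
    omega
  set m := n.toNat with hmdef
  by_cases h1 : m ≤ 999999999
  · have hq : m / 1000000000 = 0 := by omega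
    have hr : m % 1000000000 = m := by omega
    rw [hq, hr, tail_millions m h1]
    simp [part, String.append_assoc]
  · rw [convA_unfold (m + 1) m (by omega)]
    simp only [convAF]
    rw [if_neg (by omega : ¬ m = 0), if_neg (by omega : ¬ m ≤ 19),
      if_neg (by omega : ¬ m ≤ 99), if_neg (by omega : ¬ m ≤ 999),
      if_neg (by omega : ¬ m ≤ 1999), if_neg (by omega : ¬ m ≤ 999999),
      if_neg (by omega : ¬ m ≤ 1999999), if_neg h1]
    by_cases h2 : m ≤ 1999999999
    · rw [if_pos h2, convA_unfold m (m % 1000000000) (by omega),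
        tail_millions (m % 1000000000) (by omega)]
      have hq : m / 1000000000 = 1 := by omega
      simp [part, hq, String.append_assoc]
    · rw [if_neg h2, convA_unfold m (m % 1000000000) (by omega),
        convA_unfold m (m / 1000000000) (by omega),
        tail_millions (m % 1000000000) (by omega),
        convA_eq_spell3 (show m / 1000000000 ≤ 999 by omega)]
      have hq1 : m / 1000000000 ≠ 1 := by omega
      have hq0 : m / 1000000000 ≠ 0 := by omega
      simp [part, hq1, hq0, String.append_assoc]
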